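-- pv_equiv track=rewrite | github.com/tim-lip/pysplit_utility_scripts | pysplit_utils.py | get_high_and_low_coords
-- ===== SOURCE A (Python) =====
-- def get_high_and_low_coords(x,y,z, treshold):
--     low_ind = [i for i in range(len(x)) if z[i] < treshold]
--     x_low = [x[i] for i in low_ind]
--     y_low = [y[i] for i in low_ind]
--     z_low = [z[i] for i in low_ind]
--
--     high_ind = [i for i in range(len(x)) if z[i] >= treshold]
--     x_high = [x[i] for i in high_ind]
--     y_high = [y[i] for i in high_ind]
--     z_high = [z[i] for i in high_ind]
--
--     return x_low, y_low, z_low, x_high, y_high, z_high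
-- ===== SOURCE B (Python) =====
-- def get_high_and_low_coords(x, y, z, treshold):
--     x_low, y_low, z_low = [], [], []
--     x_high, y_high, z_high = [], [], []
--     for i in range(len(x)):
--         if z[i] < treshold:
--             x_low.append(x[i])
--             y_low.append(y[i])
--             z_low.append(z[i])
--         else:
--             x_high.append(x[i])
--             y_high.append(y[i])
--             z_high.append(z[i])
--     return x_low, y_low, z_low, x_high, y_high, z_high
-- ===== Notes on version B (the rewrite author's own statement) =====
-- stated objective: simpler
-- what changed: Replaces A's eight separate passes (two index-list comprehensions plus six gather comprehensions) with one loop that appends each coordinate triple to the low or high lists as it goes.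
import Mathlib
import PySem

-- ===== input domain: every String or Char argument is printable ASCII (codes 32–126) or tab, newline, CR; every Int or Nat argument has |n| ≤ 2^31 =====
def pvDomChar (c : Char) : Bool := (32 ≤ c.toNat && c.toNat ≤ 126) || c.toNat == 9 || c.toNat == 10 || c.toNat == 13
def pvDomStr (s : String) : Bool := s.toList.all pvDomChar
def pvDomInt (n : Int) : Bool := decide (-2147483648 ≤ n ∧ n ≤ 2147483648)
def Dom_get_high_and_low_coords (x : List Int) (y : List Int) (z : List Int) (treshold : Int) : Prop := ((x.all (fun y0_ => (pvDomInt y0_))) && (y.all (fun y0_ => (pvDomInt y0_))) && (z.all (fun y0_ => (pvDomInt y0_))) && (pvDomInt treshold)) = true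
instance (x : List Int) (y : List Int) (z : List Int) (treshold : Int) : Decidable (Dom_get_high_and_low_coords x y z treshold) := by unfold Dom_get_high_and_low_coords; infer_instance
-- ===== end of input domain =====

-- B replaces A's eight list-comprehension passes by one single partitioning loop (objective: simpler).

-- ===== PORT A =====
-- z[i]/x[i]/y[i] are ported as pyGetD · · 0; under Pre_ every index is in range, so this is exact.
def get_high_and_low_coords (x : List Int) (y : List Int) (z : List Int) (treshold : Int) : List Int × List Int × List Int × List Int × List Int × List Int :=
  let low_ind := (PySem.List.pyRange 0 x.length 1).filter (fun i => PySem.List.pyGetD z i 0 < treshold)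
  let x_low := low_ind.map (fun i => PySem.List.pyGetD x i 0)
  let y_low := low_ind.map (fun i => PySem.List.pyGetD y i 0)
  let z_low := low_ind.map (fun i => PySem.List.pyGetD z i 0)
  let high_ind := (PySem.List.pyRange 0 x.length 1).filter (fun i => treshold ≤ PySem.List.pyGetD z i 0)
  let x_high := high_ind.map (fun i => PySem.List.pyGetD x i 0)
  let y_high := high_ind.map (fun i => PySem.List.pyGetD y i 0)
  let z_high := high_ind.map (fun i => PySem.List.pyGetD z i 0)
  (x_low, y_low, z_low, x_high, y_high, z_high)

-- ===== PORT B =====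
-- the body of Source B's loop: append the i-th triple to the low or high lists
def pvStep (x : List Int) (y : List Int) (z : List Int) (treshold : Int)
    (s : List Int × List Int × List Int × List Int × List Int × List Int) (i : Int) :
    List Int × List Int × List Int × List Int × List Int × List Int :=
  if PySem.List.pyGetD z i 0 < treshold then
    (s.1 ++ [PySem.List.pyGetD x i 0], s.2.1 ++ [PySem.List.pyGetD y i 0], s.2.2.1 ++ [PySem.List.pyGetD z i 0],
     s.2.2.2.1, s.2.2.2.2.1, s.2.2.2.2.2)
  else
    (s.1, s.2.1, s.2.2.1,
     s.2.2.2.1 ++ [PySem.List.pyGetD x i 0], s.2.2.2.2.1 ++ [PySem.List.pyGetD y i 0], s.2.2.2.2.2 ++ [PySem.List.pyGetD z i 0])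

def get_high_and_low_coords_alt (x : List Int) (y : List Int) (z : List Int) (treshold : Int) : List Int × List Int × List Int × List Int × List Int × List Int :=
  (PySem.List.pyRange 0 x.length 1).foldl (pvStep x y z treshold) ([], [], [], [], [], [])

-- ===== PRECONDITION & SPEC =====
-- Pre_ excludes exactly the inputs where Python A raises IndexError: y or z shorter than x.
def Pre_get_high_and_low_coords (x : List Int) (y : List Int) (z : List Int) (treshold : Int) : Prop :=
  x.length ≤ y.length ∧ x.length ≤ z.length
instance (x : List Int) (y : List Int) (z : List Int) (treshold : Int) : Decidable (Pre_get_high_and_low_coords x y z treshold) := by unfold Pre_get_high_and_low_coords; infer_instance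

def pvWitness_get_high_and_low_coords : List Int × List Int × List Int × Int := ([1, 2, 3], [4, 5, 6], [0, 7, 1], 3)

def Spec_get_high_and_low_coords (x : List Int) (y : List Int) (z : List Int) (treshold : Int) (out : List Int × List Int × List Int × List Int × List Int × List Int) : Prop := out = get_high_and_low_coords_alt x y z treshold
instance (x : List Int) (y : List Int) (z : List Int) (treshold : Int) (out : List Int × List Int × List Int × List Int × List Int × List Int) : Decidable (Spec_get_high_and_low_coords x y z treshold out) := by unfold Spec_get_high_and_low_coords; infer_instance

-- ===== CLAIM (what is proved, stated in full; the proofs are below) =====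
def Claim_equal_get_high_and_low_coords : Prop := ∀ (x : List Int) (y : List Int) (z : List Int) (treshold : Int), Dom_get_high_and_low_coords x y z treshold → Pre_get_high_and_low_coords x y z treshold → Spec_get_high_and_low_coords x y z treshold (get_high_and_low_coords x y z treshold)

-- ===== LEMMAS AND PROOFS =====

theorem pvFold_spec (x y z : List Int) (t : Int) (n : Nat) :
    ∀ acc : List Int × List Int × List Int × List Int × List Int × List Int,
    (PySem.List.pyRange 0 n 1).foldl (pvStep x y z t) acc =
      (acc.1 ++ ((PySem.List.pyRange 0 n 1).filter (fun i => PySem.List.pyGetD z i 0 < t)).map (fun i => PySem.List.pyGetD x i 0),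
       acc.2.1 ++ ((PySem.List.pyRange 0 n 1).filter (fun i => PySem.List.pyGetD z i 0 < t)).map (fun i => PySem.List.pyGetD y i 0),
       acc.2.2.1 ++ ((PySem.List.pyRange 0 n 1).filter (fun i => PySem.List.pyGetD z i 0 < t)).map (fun i => PySem.List.pyGetD z i 0),
       acc.2.2.2.1 ++ ((PySem.List.pyRange 0 n 1).filter (fun i => ¬ PySem.List.pyGetD z i 0 < t)).map (fun i => PySem.List.pyGetD x i 0),
       acc.2.2.2.2.1 ++ ((PySem.List.pyRange 0 n 1).filter (fun i => ¬ PySem.List.pyGetD z i 0 < t)).map (fun i => PySem.List.pyGetD y i 0),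
       acc.2.2.2.2.2 ++ ((PySem.List.pyRange 0 n 1).filter (fun i => ¬ PySem.List.pyGetD z i 0 < t)).map (fun i => PySem.List.pyGetD z i 0)) := by
  induction n with
  | zero =>
    intro acc
    simp [PySem.List.pyRange_one_eq_nil]
  | succ n ih =>
    intro acc
    have hcast : ((n + 1 : Nat) : Int) = (n : Int) + 1 := by push_cast; ring
    rw [hcast, PySem.List.pyRange_one_succ_right (by exact_mod_cast Nat.zero_le n), List.foldl_append,
      List.filter_append, List.filter_append, ih]
    by_cases h : z[n]?.getD 0 < t
    · simp [pvStep, h, not_le.mpr h, List.append_assoc]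
    · simp [pvStep, h, not_lt.mp h, List.append_assoc]

theorem pvFilter_ge (z : List Int) (t : Int) (l : List Int) :
    l.filter (fun i => t ≤ PySem.List.pyGetD z i 0) =
    l.filter (fun i => ¬ PySem.List.pyGetD z i 0 < t) := by
  apply List.filter_congr
  intro i _
  simp [not_lt]

-- ===== VERDICT (by name: the statement is the Claim_ definition above) =====
theorem get_high_and_low_coords_spec : Claim_equal_get_high_and_low_coords := by
  intro x y z t _ _
  unfold Spec_get_high_and_low_coords get_high_and_low_coords get_high_and_low_coords_alt
  rw [pvFold_spec, pvFilter_ge]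
  simp
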